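-- pv_equiv track=rewrite | github.com/ChristianGreiner/htwg-algotech | divide-and-conquer/anzahlnichtnegativen.py | count_non_negative_numbers
-- ===== SOURCE A (Python) =====
-- def count_non_negative_numbers(arr, start, end):
--     if start > end:
--         return 0
--
--     if start == end:
--         if arr[start] >= 0:
--             return 1
--         else:
--             return 0
--
--     mid = (start + end) // 2
--     count_left = count_non_negative_numbers(arr, start, mid)
--     count_right = count_non_negative_numbers(arr, mid+1, end)
--
--     return count_left + count_right
-- ===== SOURCE B (Python) =====
-- def count_non_negative_numbers(arr, start, end):
--     count = 0
--     for i in range(start, end + 1):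
--         if arr[i] >= 0:
--             count += 1
--     return count
-- ===== Notes on version B (the rewrite author's own statement) =====
-- stated objective: simpler
-- what changed: Replaces the divide-and-conquer recursion (split at mid, recurse on both halves, add the counts) with a single flat loop over range(start, end+1) that keeps one running counter.
import Mathlib
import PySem

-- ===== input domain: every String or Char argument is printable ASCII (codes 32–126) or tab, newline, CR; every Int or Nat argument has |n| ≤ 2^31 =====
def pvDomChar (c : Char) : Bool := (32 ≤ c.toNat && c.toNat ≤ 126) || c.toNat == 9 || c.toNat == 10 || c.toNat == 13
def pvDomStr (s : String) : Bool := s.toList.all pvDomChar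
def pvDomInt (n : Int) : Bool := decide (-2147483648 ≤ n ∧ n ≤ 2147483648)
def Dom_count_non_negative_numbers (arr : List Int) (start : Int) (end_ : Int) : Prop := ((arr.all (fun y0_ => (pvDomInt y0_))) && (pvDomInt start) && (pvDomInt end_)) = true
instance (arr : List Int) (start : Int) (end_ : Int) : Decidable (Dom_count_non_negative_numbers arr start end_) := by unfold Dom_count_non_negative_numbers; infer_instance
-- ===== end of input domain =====

-- B replaces A's divide-and-conquer recursion with one flat counting loop (simpler, same cost).

-- ===== PORT A =====
-- Literal port of A's divide-and-conquer recursion; arr[i] is PySem.List.pyGetD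
-- (in-range on every input admitted by Pre_, where Python does not raise).
def count_non_negative_numbers (arr : List Int) (start : Int) (end_ : Int) : Int :=
  if start > end_ then 0
  else if start = end_ then
    (if 0 ≤ PySem.List.pyGetD arr start 0 then 1 else 0)
  else
    let mid := PySem.Int.floordiv (start + end_) 2
    count_non_negative_numbers arr start mid +
      count_non_negative_numbers arr (mid + 1) end_
termination_by (end_ - start).toNat
decreasing_by
  · have h := PySem.Int.floordiv_two_mid_bounds (lo := start) (hi := end_) (by omega)
    have h2 : PySem.Int.floordiv (start + end_) 2 < end_ := by
      rw [PySem.Int.floordiv_lt_iff_lt_mul (by omega)]; omega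
    omega
  · have h := PySem.Int.floordiv_two_mid_bounds (lo := start) (hi := end_) (by omega)
    omega

-- ===== PORT B =====
-- Literal port of B: count = 0; for i in range(start, end+1): if arr[i] >= 0: count += 1
def count_non_negative_numbers_alt (arr : List Int) (start : Int) (end_ : Int) : Int :=
  (PySem.List.pyRange start (end_ + 1) 1).foldl
    (fun count i => if 0 ≤ PySem.List.pyGetD arr i 0 then count + 1 else count) 0

-- ===== PRECONDITION & SPEC =====
-- Pre_ excludes exactly the inputs where Python's arr[i] raises IndexError: a non-empty
-- range [start, end] reaching an index outside [-len(arr), len(arr)-1].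
def Pre_count_non_negative_numbers (arr : List Int) (start : Int) (end_ : Int) : Prop :=
  start > end_ ∨ (-(arr.length : Int) ≤ start ∧ end_ < (arr.length : Int))
instance (arr : List Int) (start : Int) (end_ : Int) : Decidable (Pre_count_non_negative_numbers arr start end_) := by unfold Pre_count_non_negative_numbers; infer_instance

def pvWitness_count_non_negative_numbers : List Int × Int × Int := ([1, -2, 3], 0, 2)

def Spec_count_non_negative_numbers (arr : List Int) (start : Int) (end_ : Int) (out : Int) : Prop := out = count_non_negative_numbers_alt arr start end_
instance (arr : List Int) (start : Int) (end_ : Int) (out : Int) : Decidable (Spec_count_non_negative_numbers arr start end_ out) := by unfold Spec_count_non_negative_numbers; infer_instance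

-- ===== CLAIM (what is proved, stated in full; the proofs are below) =====
def Claim_equal_count_non_negative_numbers : Prop := ∀ (arr : List Int) (start : Int) (end_ : Int), Dom_count_non_negative_numbers arr start end_ → Pre_count_non_negative_numbers arr start end_ → Spec_count_non_negative_numbers arr start end_ (count_non_negative_numbers arr start end_)

-- ===== LEMMAS AND PROOFS =====

-- the per-index test, as a Bool predicate (for List.countP)
def pvNonNeg (arr : List Int) (i : Int) : Bool := decide (0 ≤ PySem.List.pyGetD arr i 0)

-- A's recursion computes the count of non-negative entries over the index range [start, end].
theorem count_eq_countP (arr : List Int) (start end_ : Int) :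
    count_non_negative_numbers arr start end_ =
      ((PySem.List.pyRange start (end_ + 1) 1).countP (pvNonNeg arr) : Int) := by
  by_cases h1 : start > end_
  · rw [count_non_negative_numbers, if_pos h1,
      PySem.List.pyRange_one_eq_nil (by omega : end_ + 1 ≤ start)]
    simp
  · by_cases h2 : start = end_
    · subst h2
      rw [count_non_negative_numbers, if_neg h1, if_pos rfl,
        PySem.List.pyRange_one_singleton]
      by_cases hx : 0 ≤ PySem.List.pyGetD arr start 0 <;>
        simp [hx, pvNonNeg, List.countP, List.countP.go]
    · have hb := PySem.Int.floordiv_two_mid_bounds (lo := start) (hi := end_) (by omega)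
      have ihl := count_eq_countP arr start (PySem.Int.floordiv (start + end_) 2)
      have ihr := count_eq_countP arr (PySem.Int.floordiv (start + end_) 2 + 1) end_
      rw [count_non_negative_numbers, if_neg h1, if_neg h2]
      show count_non_negative_numbers arr start (PySem.Int.floordiv (start + end_) 2) +
          count_non_negative_numbers arr (PySem.Int.floordiv (start + end_) 2 + 1) end_ =
          ((PySem.List.pyRange start (end_ + 1) 1).countP (pvNonNeg arr) : Int)
      rw [ihl, ihr,
        PySem.List.pyRange_one_append start (PySem.Int.floordiv (start + end_) 2 + 1) (end_ + 1)
          (by omega) (by omega),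
        List.countP_append]
      push_cast; ring
termination_by (end_ - start).toNat
decreasing_by
  · have h2 : PySem.Int.floordiv (start + end_) 2 < end_ := by
      rw [PySem.Int.floordiv_lt_iff_lt_mul (by omega)]; omega
    omega
  · omega

-- B's loop computes the same count.
theorem alt_eq_countP (arr : List Int) (start end_ : Int) :
    count_non_negative_numbers_alt arr start end_ =
      ((PySem.List.pyRange start (end_ + 1) 1).countP (pvNonNeg arr) : Int) := by
  unfold count_non_negative_numbers_alt
  have : (fun (count : Int) (i : Int) =>
      if 0 ≤ PySem.List.pyGetD arr i 0 then count + 1 else count) =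
      (fun (count : Int) (i : Int) => if pvNonNeg arr i = true then count + 1 else count) := by
    funext c i; simp [pvNonNeg]
  rw [this, PySem.List.foldl_count_if]
  simp

-- ===== VERDICT (by name: the statement is the Claim_ definition above) =====
theorem count_non_negative_numbers_spec : Claim_equal_count_non_negative_numbers := by
  intro arr start end_ _ _
  unfold Spec_count_non_negative_numbers
  rw [count_eq_countP, alt_eq_countP]
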